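-- pv_equiv track=rewrite | github.com/The-Obstacle-Is-The-Way/Novamind-Backend-ONLY-TWINS | backend/scripts/test/tools/indentation_fixer.py | _fix_unmatched_parenthesis
-- ===== SOURCE A (Python) =====
-- from typing import Dict, List, Optional, Set, Tuple
--
-- def _fix_unmatched_parenthesis(lines: List[str], line_idx: int) -> List[str]:
--     """Fix unmatched parenthesis by counting and matching them."""
--     line = lines[line_idx]
--
--     # Count open and close parentheses
--     open_count = line.count('(')
--     close_count = line.count(')')
--
--     if close_count > open_count:
--         # Too many closing parentheses, remove extras
--         diff = close_count - open_count
--         for _ in range(diff):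
--             pos = line.rfind(')')
--             if pos >= 0:
--                 line = line[:pos] + line[pos+1:]
--
--         lines[line_idx] = line
--
--     return lines
-- ===== SOURCE B (Python) =====
-- def _fix_unmatched_parenthesis(lines, line_idx):
--     """Fix unmatched parenthesis by counting and matching them."""
--     line = lines[line_idx]
--     open_count = line.count('(')
--     close_count = line.count(')')
--     if close_count > open_count:
--         diff = close_count - open_count
--         out = []
--         for ch in reversed(line):
--             if diff > 0 and ch == ')':
--                 diff -= 1
--             else:
--                 out.append(ch)
--         out.reverse()
--         lines[line_idx] = ''.join(out)
--     return lines
-- ===== Notes on version B (the rewrite author's own statement) =====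
-- stated objective: alternative
-- what changed: Replaces the for-range loop of repeated rfind scans and string reconcatenations with a single right-to-left pass that drops the last diff closing parens while rebuilding the line once; same asymptotic cost in practice since diff is typically small.
import Mathlib
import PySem

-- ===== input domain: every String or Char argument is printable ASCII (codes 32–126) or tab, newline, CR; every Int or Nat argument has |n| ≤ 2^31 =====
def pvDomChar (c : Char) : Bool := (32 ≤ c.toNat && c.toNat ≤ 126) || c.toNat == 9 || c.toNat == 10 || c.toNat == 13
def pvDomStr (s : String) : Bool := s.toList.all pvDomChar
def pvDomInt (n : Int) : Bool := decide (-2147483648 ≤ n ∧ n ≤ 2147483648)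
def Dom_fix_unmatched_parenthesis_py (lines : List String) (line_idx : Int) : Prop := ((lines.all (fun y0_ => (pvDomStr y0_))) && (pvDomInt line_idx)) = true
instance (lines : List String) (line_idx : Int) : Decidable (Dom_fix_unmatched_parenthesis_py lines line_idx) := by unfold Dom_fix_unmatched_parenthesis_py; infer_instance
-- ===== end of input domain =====

-- B replaces A's repeated rfind-and-rebuild loop by one right-to-left pass dropping the
-- last `diff` closing parens (objective: alternative). Both mutate lines[line_idx] in place
-- in Python; the equivalence proved here is about the returned list, which carries that update.

-- ===== PORT A =====
-- one body of A's `for _ in range(diff)` loop: pos = line.rfind(')'); if pos >= 0: line = line[:pos] + line[pos+1:]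
def pvAStep (l : List Char) : List Char :=
  let pos := PySem.Chars.rfind l [')']
  if pos ≥ 0 then
    PySem.Chars.slice l none (some pos) ++ PySem.Chars.slice l (some (pos + 1)) none
  else l

def fix_unmatched_parenthesis_py (lines : List String) (line_idx : Int) : List String :=
  let line := PySem.List.pyGetD lines line_idx ""
  let open_count := PySem.Str.count line "("
  let close_count := PySem.Str.count line ")"
  if open_count < close_count then
    let diff := close_count - open_count
    let line' := (List.range diff).foldl (fun l _ => pvAStep l) line.toList
    PySem.List.pySetD lines line_idx (String.ofList line')
  else lines

-- ===== PORT B =====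
-- B's single reverse pass: walk the reversed characters, dropping the first d closing parens.
def pvScan : List Char → Nat → List Char
  | [], _ => []
  | c :: t, d => if 0 < d ∧ c = ')' then pvScan t (d - 1) else c :: pvScan t d

def fix_unmatched_parenthesis_py_alt (lines : List String) (line_idx : Int) : List String :=
  let line := PySem.List.pyGetD lines line_idx ""
  let open_count := PySem.Str.count line "("
  let close_count := PySem.Str.count line ")"
  if open_count < close_count then
    let out := pvScan line.toList.reverse (close_count - open_count)
    PySem.List.pySetD lines line_idx (String.ofList out.reverse)
  else lines

-- ===== PRECONDITION & SPEC =====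
-- Pre_ excludes exactly the indices on which Python's lines[line_idx] raises IndexError.
def Pre_fix_unmatched_parenthesis_py (lines : List String) (line_idx : Int) : Prop :=
  -(lines.length : Int) ≤ line_idx ∧ line_idx < (lines.length : Int)
instance (lines : List String) (line_idx : Int) : Decidable (Pre_fix_unmatched_parenthesis_py lines line_idx) := by unfold Pre_fix_unmatched_parenthesis_py; infer_instance

def pvWitness_fix_unmatched_parenthesis_py : List String × Int := (["f(a))) "], 0)

def Spec_fix_unmatched_parenthesis_py (lines : List String) (line_idx : Int) (out : List String) : Prop := out = fix_unmatched_parenthesis_py_alt lines line_idx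
instance (lines : List String) (line_idx : Int) (out : List String) : Decidable (Spec_fix_unmatched_parenthesis_py lines line_idx out) := by unfold Spec_fix_unmatched_parenthesis_py; infer_instance

-- ===== CLAIM (what is proved, stated in full; the proofs are below) =====
def Claim_equal_fix_unmatched_parenthesis_py : Prop := ∀ (lines : List String) (line_idx : Int), Dom_fix_unmatched_parenthesis_py lines line_idx → Pre_fix_unmatched_parenthesis_py lines line_idx → Spec_fix_unmatched_parenthesis_py lines line_idx (fix_unmatched_parenthesis_py lines line_idx)

-- ===== LEMMAS AND PROOFS =====

theorem pvScan_zero (l : List Char) : pvScan l 0 = l := by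
  induction l with
  | nil => rfl
  | cons c t ih => simp [pvScan, ih]

theorem pvScan_one (l : List Char) (n : Nat) :
    pvScan (pvScan l n) 1 = pvScan l (n + 1) := by
  induction l generalizing n with
  | nil => rfl
  | cons c t ih =>
    by_cases hc : c = ')'
    · cases n with
      | zero => simp [pvScan_zero, pvScan, hc]
      | succ k =>
        have h1 : pvScan (c :: t) (k + 1) = pvScan t k := by simp [pvScan, hc]
        have h2 : pvScan (c :: t) (k + 2) = pvScan t (k + 1) := by simp [pvScan, hc]
        rw [h1, h2, ih]
    · have h1 : pvScan (c :: t) n = c :: pvScan t n := by simp [pvScan, hc]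
      have h2 : pvScan (c :: t) (n + 1) = c :: pvScan t (n + 1) := by simp [pvScan, hc]
      have h3 : pvScan (c :: pvScan t n) 1 = c :: pvScan (pvScan t n) 1 := by simp [pvScan, hc]
      rw [h1, h2, h3, ih]

theorem pvScan_no_close (l : List Char) (d : Nat) (h : ')' ∉ l) : pvScan l d = l := by
  induction l with
  | nil => rfl
  | cons c t ih =>
    have hc : c ≠ ')' := fun hc => h (hc ▸ List.mem_cons_self)
    simp [pvScan, hc, ih (fun ht => h (List.mem_cons_of_mem _ ht))]

theorem pvScan_skip (a b : List Char) (h : ')' ∉ a) :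
    pvScan (a ++ ')' :: b) 1 = a ++ b := by
  induction a with
  | nil => simp [pvScan, pvScan_zero]
  | cons c t ih =>
    have hc : c ≠ ')' := fun hc => h (hc ▸ List.mem_cons_self)
    simp [pvScan, hc, ih (fun ht => h (List.mem_cons_of_mem _ ht))]

-- last-occurrence decomposition of a list containing ')'
theorem pv_last_close (l : List Char) (h : ')' ∈ l) :
    ∃ u v, l = u ++ ')' :: v ∧ ')' ∉ v := by
  induction l with
  | nil => cases h
  | cons c t ih =>
    by_cases ht : ')' ∈ t
    · obtain ⟨u, v, rfl, hv⟩ := ih ht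
      exact ⟨c :: u, v, rfl, hv⟩
    · have hc : c = ')' := by
        rcases List.mem_cons.mp h with h' | h'
        · exact h'.symm
        · exact absurd h' ht
      exact ⟨[], t, by simp [hc], ht⟩

-- [')'] is a prefix of l iff l starts with ')'
theorem pv_prefix_close (l : List Char) :
    [')'].isPrefixOf l = true ↔ ∃ t, l = ')' :: t := by
  cases l with
  | nil => simp [List.isPrefixOf]
  | cons c t =>
    constructor
    · intro hp
      have hc : ')' = c := by simpa [List.isPrefixOf] using hp
      exact ⟨t, by rw [← hc]⟩
    · rintro ⟨t', ht⟩
      injection ht with h1 h2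
      simp [List.isPrefixOf, h1]

theorem pv_go_none (s : List Char) (j : Nat) (h : ')' ∉ s) :
    PySem.Chars.rfind.go s [')'] j = -1 := by
  induction j with
  | zero =>
    simp only [PySem.Chars.rfind.go]
    have : ¬ [')'].isPrefixOf s = true := by
      rw [pv_prefix_close]
      rintro ⟨t, rfl⟩
      exact h List.mem_cons_self
    simp [this]
  | succ k ih =>
    simp only [PySem.Chars.rfind.go]
    have : ¬ [')'].isPrefixOf (List.drop (k + 1) s) = true := by
      rw [pv_prefix_close]
      rintro ⟨t, ht⟩
      exact h (List.mem_of_mem_drop (ht ▸ List.mem_cons_self))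
    simp [this, ih]

theorem pv_go_last (u v : List Char) (hv : ')' ∉ v) :
    ∀ j, u.length ≤ j → PySem.Chars.rfind.go (u ++ ')' :: v) [')'] j = (u.length : Int) := by
  intro j
  induction j with
  | zero =>
    intro hj
    have hu : u = [] := List.eq_nil_of_length_eq_zero (Nat.le_zero.mp hj)
    subst hu
    simp only [PySem.Chars.rfind.go, List.nil_append]
    have : [')'].isPrefixOf (')' :: v) = true := (pv_prefix_close _).mpr ⟨v, rfl⟩
    simp [this]
  | succ k ih =>
    intro hj
    simp only [PySem.Chars.rfind.go]
    by_cases he : u.length = k + 1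
    · have : List.drop (k + 1) (u ++ ')' :: v) = ')' :: v := by
        rw [← he, List.drop_append_of_le_length (le_refl _)]
        simp
      rw [this]
      have hp : [')'].isPrefixOf (')' :: v) = true := (pv_prefix_close _).mpr ⟨v, rfl⟩
      simp [hp, he]
    · have hlt : u.length ≤ k := by omega
      have hdrop : ')' ∉ List.drop (k + 1) (u ++ ')' :: v) := by
        intro hm
        have hk : k + 1 = u.length + (k + 1 - u.length) := by omega
        rw [hk, List.drop_length_add_append] at hm
        have h2 : List.drop (k + 1 - u.length) (')' :: v) = List.drop (k - u.length) v := by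
          have : k + 1 - u.length = (k - u.length) + 1 := by omega
          rw [this]; rfl
        rw [h2] at hm
        exact hv (List.mem_of_mem_drop hm)
      have : ¬ [')'].isPrefixOf (List.drop (k + 1) (u ++ ')' :: v)) = true := by
        rw [pv_prefix_close]
        rintro ⟨t, ht⟩
        exact hdrop (ht ▸ List.mem_cons_self)
      simp [this, ih hlt]

theorem pv_rfind_none (s : List Char) (h : ')' ∉ s) : PySem.Chars.rfind s [')'] = -1 :=
  pv_go_none s s.length h

theorem pv_rfind_last (u v : List Char) (hv : ')' ∉ v) :
    PySem.Chars.rfind (u ++ ')' :: v) [')'] = (u.length : Int) := by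
  apply pv_go_last u v hv
  simp

-- ONE step of A's loop is B's reverse pass with budget 1
theorem pvAStep_eq (l : List Char) : pvAStep l = (pvScan l.reverse 1).reverse := by
  by_cases h : ')' ∈ l
  · obtain ⟨u, v, rfl, hv⟩ := pv_last_close l h
    have hf := pv_rfind_last u v hv
    have hpos : (0 : Int) ≤ (u.length : Int) := by positivity
    have hs1 : PySem.Chars.slice (u ++ ')' :: v) none (some (u.length : Int)) = u := by
      rw [PySem.Chars.slice_eq_listSlice, PySem.List.slice_to _ hpos]
      simp
    have hs2 : PySem.Chars.slice (u ++ ')' :: v) (some ((u.length : Int) + 1)) none = v := by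
      have hcast : (u.length : Int) + 1 = ((u.length + 1 : Nat) : Int) := by push_cast; ring
      rw [PySem.Chars.slice_eq_listSlice, hcast, PySem.List.slice_from_natCast]
      rw [List.drop_length_add_append]
      rfl
    have hrev : (u ++ ')' :: v).reverse = v.reverse ++ ')' :: u.reverse := by simp
    have hvr : ')' ∉ v.reverse := by simpa using hv
    rw [pvAStep, hf]
    simp only [ge_iff_le, hpos, if_pos, hs1, hs2, hrev, pvScan_skip _ _ hvr]
    simp
  · rw [pvAStep, pv_rfind_none l h]
    have hr : ')' ∉ l.reverse := by simpa using h
    simp [pvScan_no_close _ _ hr]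

-- A's whole loop is B's reverse pass with budget n
theorem pv_loop_eq (l : List Char) (n : Nat) :
    (List.range n).foldl (fun l _ => pvAStep l) l = (pvScan l.reverse n).reverse := by
  induction n with
  | zero => simp [pvScan_zero]
  | succ k ih =>
    rw [List.range_succ, List.foldl_append, ih]
    simp only [List.foldl_cons, List.foldl_nil]
    rw [pvAStep_eq, List.reverse_reverse, pvScan_one]

-- ===== VERDICT (by name: the statement is the Claim_ definition above) =====
theorem fix_unmatched_parenthesis_py_spec : Claim_equal_fix_unmatched_parenthesis_py := by
  intro lines line_idx _hd _hp
  unfold Spec_fix_unmatched_parenthesis_py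
  unfold fix_unmatched_parenthesis_py fix_unmatched_parenthesis_py_alt
  simp only []
  split
  · rw [pv_loop_eq]
  · rfl
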